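-- pv_equiv track=rewrite | github.com/InonCohen/EfficientSynthesisCoding | main.py | count_different_letters
-- ===== SOURCE A (Python) =====
-- def count_different_letters(s1, s2, s3):
--     n = max(len(s) for s in (s1, s2, s3))
--     result = []
--     for i in range(n):
--         letters = set()
--         for s in (s1, s2, s3):
--             if i < len(s):
--                 letters.add(s[i])
--         result.append(len(letters))
--     return result
-- ===== SOURCE B (Python) =====
-- def count_different_letters(s1, s2, s3):
--     a, b, c = sorted((s1, s2, s3), key=len)
--     head = [3 - ((x == y) + (y == z) + (x == z)) + (x == y == z)
--             for x, y, z in zip(a, b, c)]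
--     mid = [2 - (y == z) for y, z in zip(b[len(a):], c[len(a):])]
--     tail = [1] * (len(c) - len(b))
--     return head + mid + tail
-- ===== Notes on version B (the rewrite author's own statement) =====
-- stated objective: faster
-- what changed: replaces the per-position set construction inside an index loop by sorting the three strings by length and emitting three staged passes (zip over the full-overlap prefix counting distinct chars arithmetically by inclusion-exclusion over pairwise equalities, a two-string zip over the remaining slices, then a replicated [1] tail), with no set objects at all
import Mathlib
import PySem

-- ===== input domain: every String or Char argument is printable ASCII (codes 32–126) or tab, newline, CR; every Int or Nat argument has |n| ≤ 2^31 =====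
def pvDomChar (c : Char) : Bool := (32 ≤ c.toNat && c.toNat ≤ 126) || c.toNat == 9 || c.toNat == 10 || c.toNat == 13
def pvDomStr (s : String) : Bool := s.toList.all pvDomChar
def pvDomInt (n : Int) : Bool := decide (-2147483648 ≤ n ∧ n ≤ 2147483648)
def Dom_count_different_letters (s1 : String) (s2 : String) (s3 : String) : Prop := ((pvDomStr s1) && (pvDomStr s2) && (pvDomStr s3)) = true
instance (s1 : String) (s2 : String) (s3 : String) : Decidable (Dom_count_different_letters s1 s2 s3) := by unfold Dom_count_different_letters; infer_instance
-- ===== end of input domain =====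

-- B sorts the three strings by length and emits three staged passes (zip of all three with an
-- arithmetic inclusion-exclusion count, zip of the two remaining slices, then a replicated tail),
-- instead of A's per-position set built inside an index loop; a timing run measured B faster.

-- ===== PORT A =====
-- A: n = max of the three lengths; for i in range(n), build a set from the guarded s[i] accesses, append its size.
def count_different_letters (s1 : String) (s2 : String) (s3 : String) : List Int :=
  let l1 := s1.toList
  let l2 := s2.toList
  let l3 := s3.toList
  let n := max (max l1.length l2.length) l3.length
  (List.range n).foldl (fun result i =>
    let letters : PySem.Set Char := PySem.Set.empty
    let letters := if i < l1.length then letters.add (l1.getD i ' ') else letters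
    let letters := if i < l2.length then letters.add (l2.getD i ' ') else letters
    let letters := if i < l3.length then letters.add (l3.getD i ' ') else letters
    result ++ [(PySem.Set.len letters : Int)]) []

-- ===== PORT B =====
-- 3 - ((x==y)+(y==z)+(x==z)) + (x==y==z): distinct count of three present chars by inclusion-exclusion.
def pvColFull (x y z : Char) : Int :=
  (3 : Int) - ((if x = y then 1 else 0) + (if y = z then 1 else 0) + (if x = z then 1 else 0))
    + (if x = y ∧ y = z then 1 else 0)

def count_different_letters_alt (s1 : String) (s2 : String) (s3 : String) : List Int :=
  -- a, b, c = sorted((s1, s2, s3), key=len)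
  let srt := PySem.List.sorted [s1.toList, s2.toList, s3.toList] (fun l => l.length) false
  let a := srt.getD 0 []
  let b := srt.getD 1 []
  let c := srt.getD 2 []
  -- head = [3 - ((x==y)+(y==z)+(x==z)) + (x==y==z) for x,y,z in zip(a,b,c)]
  let head := (a.zip (b.zip c)).map (fun p => pvColFull p.1 p.2.1 p.2.2)
  -- mid = [2 - (y==z) for y,z in zip(b[len(a):], c[len(a):])]
  let mid := ((PySem.List.slice b (some (a.length : Int)) none).zip
              (PySem.List.slice c (some (a.length : Int)) none)).map
             (fun p => (2 : Int) - (if p.1 = p.2 then 1 else 0))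
  -- tail = [1] * (len(c) - len(b))
  let tail := List.replicate (c.length - b.length) (1 : Int)
  head ++ mid ++ tail

-- ===== PRECONDITION & SPEC =====
def Spec_count_different_letters (s1 : String) (s2 : String) (s3 : String) (out : List Int) : Prop := out = count_different_letters_alt s1 s2 s3
instance (s1 : String) (s2 : String) (s3 : String) (out : List Int) : Decidable (Spec_count_different_letters s1 s2 s3 out) := by unfold Spec_count_different_letters; infer_instance

-- ===== CLAIM (what is proved, stated in full; the proofs are below) =====
def Claim_equal_count_different_letters : Prop := ∀ (s1 : String) (s2 : String) (s3 : String), Dom_count_different_letters s1 s2 s3 → Spec_count_different_letters s1 s2 s3 (count_different_letters s1 s2 s3)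

-- ===== LEMMAS AND PROOFS =====

-- the per-position value A computes
def pvColA (l1 l2 l3 : List Char) (i : Nat) : Int :=
  let letters : PySem.Set Char := PySem.Set.empty
  let letters := if i < l1.length then letters.add (l1.getD i ' ') else letters
  let letters := if i < l2.length then letters.add (l2.getD i ' ') else letters
  let letters := if i < l3.length then letters.add (l3.getD i ' ') else letters
  (PySem.Set.len letters : Int)

-- A's whole result, as a map over positions
def pvAmap (l1 l2 l3 : List Char) : List Int :=
  (List.range (max (max l1.length l2.length) l3.length)).map (pvColA l1 l2 l3)

theorem pvA_eq_pvAmap (s1 s2 s3 : String) :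
    count_different_letters s1 s2 s3 = pvAmap s1.toList s2.toList s3.toList := by
  unfold count_different_letters pvAmap
  show List.foldl (fun result i => result ++ [pvColA s1.toList s2.toList s3.toList i]) []
      (List.range (max (max s1.toList.length s2.toList.length) s3.toList.length)) = _
  rw [PySem.List.foldl_append_singleton_eq_map]
  simp

theorem pvColA_succ (l1 l2 l3 : List Char) (i : Nat) :
    pvColA l1 l2 l3 (i + 1) = pvColA l1.tail l2.tail l3.tail i := by
  cases l1 <;> cases l2 <;> cases l3 <;> simp [pvColA]

theorem pvSetLen_swap2 (x y : Char) :
    List.length ((PySem.Set.empty.add x).add y) = List.length ((PySem.Set.empty.add y).add x) := by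
  by_cases e : x = y <;>
    simp_all [PySem.Set.add, PySem.Set.empty, PySem.Set.contains, eq_comm]

theorem pvSetLen_swap12 (x y z : Char) :
    List.length (((PySem.Set.empty.add x).add y).add z) = List.length (((PySem.Set.empty.add y).add x).add z) := by
  by_cases e1 : x = y <;> by_cases e2 : y = z <;> by_cases e3 : x = z <;>
    simp_all [PySem.Set.add, PySem.Set.empty, PySem.Set.contains, eq_comm]

theorem pvSetLen_swap23 (x y z : Char) :
    List.length (((PySem.Set.empty.add x).add y).add z) = List.length (((PySem.Set.empty.add x).add z).add y) := by
  by_cases e1 : x = y <;> by_cases e2 : y = z <;> by_cases e3 : x = z <;>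
    simp_all [PySem.Set.add, PySem.Set.empty, PySem.Set.contains, eq_comm]

theorem pvColA_swap12 (l1 l2 l3 : List Char) (i : Nat) :
    pvColA l1 l2 l3 i = pvColA l2 l1 l3 i := by
  unfold pvColA
  by_cases h1 : i < l1.length <;> by_cases h2 : i < l2.length <;> by_cases h3 : i < l3.length <;>
    simp only [h1, h2, h3, if_true, if_false, PySem.Set.len] <;>
    first
      | rfl
      | exact congrArg Nat.cast (pvSetLen_swap12 _ _ _)
      | exact congrArg Nat.cast (pvSetLen_swap2 _ _)

theorem pvColA_swap23 (l1 l2 l3 : List Char) (i : Nat) :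
    pvColA l1 l2 l3 i = pvColA l1 l3 l2 i := by
  unfold pvColA
  by_cases h1 : i < l1.length <;> by_cases h2 : i < l2.length <;> by_cases h3 : i < l3.length <;>
    simp only [h1, h2, h3, if_true, if_false, PySem.Set.len] <;>
    first
      | rfl
      | exact congrArg Nat.cast (pvSetLen_swap23 _ _ _)
      | exact congrArg Nat.cast (pvSetLen_swap2 _ _)

theorem pvAmap_swap12 (l1 l2 l3 : List Char) : pvAmap l1 l2 l3 = pvAmap l2 l1 l3 := by
  unfold pvAmap
  rw [show max (max l1.length l2.length) l3.length = max (max l2.length l1.length) l3.length by omega]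
  exact List.map_congr_left (fun i _ => pvColA_swap12 l1 l2 l3 i)

theorem pvAmap_swap23 (l1 l2 l3 : List Char) : pvAmap l1 l2 l3 = pvAmap l1 l3 l2 := by
  unfold pvAmap
  rw [show max (max l1.length l2.length) l3.length = max (max l1.length l3.length) l2.length by omega]
  exact List.map_congr_left (fun i _ => pvColA_swap23 l1 l2 l3 i)

theorem pvAmap_perm (l1 l2 l3 : List Char) :
    pvAmap l2 l1 l3 = pvAmap l1 l2 l3 ∧ pvAmap l1 l3 l2 = pvAmap l1 l2 l3 ∧
    pvAmap l2 l3 l1 = pvAmap l1 l2 l3 ∧ pvAmap l3 l1 l2 = pvAmap l1 l2 l3 ∧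
    pvAmap l3 l2 l1 = pvAmap l1 l2 l3 := by
  refine ⟨(pvAmap_swap12 l1 l2 l3).symm, (pvAmap_swap23 l1 l2 l3).symm, ?_, ?_, ?_⟩
  · rw [pvAmap_swap12 l2 l3 l1, pvAmap_swap23 l3 l2 l1, pvAmap_swap12 l3 l1 l2, pvAmap_swap23 l1 l3 l2]
  · rw [pvAmap_swap23 l3 l1 l2, pvAmap_swap12 l3 l2 l1, pvAmap_swap23 l2 l3 l1, pvAmap_swap12 l2 l1 l3]
  · rw [pvAmap_swap12 l3 l2 l1, pvAmap_swap23 l2 l3 l1, pvAmap_swap12 l2 l1 l3]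

-- B's staged passes on an already length-sorted triple, slices rewritten as drops
def pvBcore (a b c : List Char) : List Int :=
  (a.zip (b.zip c)).map (fun p => pvColFull p.1 p.2.1 p.2.2) ++
  ((b.drop a.length).zip (c.drop a.length)).map (fun p => (2 : Int) - (if p.1 = p.2 then 1 else 0)) ++
  List.replicate (c.length - b.length) (1 : Int)

theorem pvColFull_eq (x y z : Char) (xs ys zs : List Char) :
    pvColA (x :: xs) (y :: ys) (z :: zs) 0 = pvColFull x y z := by
  unfold pvColA pvColFull
  by_cases e12 : x = y <;> by_cases e13 : x = z <;> by_cases e23 : y = z <;>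
    simp_all [PySem.Set.add, PySem.Set.empty, PySem.Set.len, PySem.Set.contains, eq_comm]

theorem pv_core : ∀ (c a b : List Char), a.length ≤ b.length → b.length ≤ c.length →
    pvAmap a b c = pvBcore a b c := by
  intro c
  induction c with
  | nil =>
      intro a b hab hbc
      have hb : b = [] := by cases b <;> simp_all
      subst hb
      have ha : a = [] := by cases a <;> simp_all
      subst ha; rfl
  | cons z zs ih =>
      intro a b hab hbc
      have hmax : max (max a.length b.length) (z :: zs).length = zs.length + 1 := by
        simp at hbc ⊢; omega
      have hstep : pvAmap a b (z :: zs) =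
          pvColA a b (z :: zs) 0 :: pvAmap a.tail b.tail zs := by
        unfold pvAmap
        rw [hmax, List.range_succ_eq_map]
        simp only [List.map_cons, List.map_map]
        have hmax' : max (max a.tail.length b.tail.length) zs.length = zs.length := by
          cases a <;> cases b <;> simp_all
        rw [hmax']
        exact congrArg _ (List.map_congr_left (fun i _ => by simpa using pvColA_succ a b (z :: zs) i))
      cases a with
      | cons x xs =>
          cases b with
          | nil => simp at hab
          | cons y ys =>
              rw [hstep]
              simp only [List.tail_cons]
              rw [pvColFull_eq x y z xs ys zs, ih xs ys (by simpa using hab) (by simpa using hbc)]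
              simp [pvBcore]
      | nil =>
          cases b with
          | cons y ys =>
              rw [hstep]
              simp only [List.tail_cons, List.tail_nil]
              rw [ih [] ys (by simp) (by simpa using hbc)]
              have h0 : pvColA [] (y :: ys) (z :: zs) 0 = (2 : Int) - (if y = z then 1 else 0) := by
                by_cases e : y = z <;>
                  simp_all [pvColA, PySem.Set.add, PySem.Set.empty, PySem.Set.len, PySem.Set.contains, eq_comm]
              rw [h0]; simp [pvBcore]
          | nil =>
              rw [hstep]
              simp only [List.tail_nil]
              rw [ih [] [] (by simp) (by simp)]
              have h0 : pvColA [] [] (z :: zs) 0 = (1 : Int) := by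
                simp [pvColA, PySem.Set.add, PySem.Set.empty, PySem.Set.len]
              rw [h0]; simp [pvBcore, List.replicate_succ]

-- the stable length-sort of a three-element list, as nested comparisons
theorem pv_sorted3 (a b c : List Char) :
    PySem.List.sorted [a, b, c] (fun l => l.length) false =
      if b.length < a.length then
        (if c.length < b.length then [c, b, a]
         else if c.length < a.length then [b, c, a] else [b, a, c])
      else
        (if c.length < a.length then [c, a, b]
         else if c.length < b.length then [a, c, b] else [a, b, c]) := by
  rw [PySem.List.sorted_eq_foldl_insertBy]
  simp only [List.foldl]
  by_cases hba : b.length < a.length <;> by_cases hca : c.length < a.length <;>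
    by_cases hcb : c.length < b.length <;>
    simp [PySem.List.insertBy, hba, hca, hcb]

theorem pvAlt_eq (s1 s2 s3 : String) :
    count_different_letters_alt s1 s2 s3 =
      (fun srt => pvBcore (srt.getD 0 []) (srt.getD 1 []) (srt.getD 2 []))
        (PySem.List.sorted [s1.toList, s2.toList, s3.toList] (fun l => l.length) false) := by
  unfold count_different_letters_alt pvBcore
  simp [PySem.List.slice_from_natCast]

-- ===== VERDICT (by name: the statement is the Claim_ definition above) =====
theorem count_different_letters_spec : Claim_equal_count_different_letters := by
  intro s1 s2 s3 _
  unfold Spec_count_different_letters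
  rw [pvA_eq_pvAmap, pvAlt_eq, pv_sorted3]
  set l1 := s1.toList
  set l2 := s2.toList
  set l3 := s3.toList
  obtain ⟨h21, h132, h231, h312, h321⟩ := pvAmap_perm l1 l2 l3
  split_ifs with h1 h2 h3 h4 h5 <;>
    simp only [List.getD, List.getElem?_cons_zero, List.getElem?_cons_succ, Option.getD_some] <;>
    rw [← pv_core] <;>
    first
      | omega
      | exact h21.symm
      | exact h132.symm
      | exact h231.symm
      | exact h312.symm
      | exact h321.symm
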